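-- pv_equiv track=rewrite | github.com/cmps143-nlp/homework_8 | baseline.py | baseline2
-- ===== SOURCE A (Python) =====
-- import sys, nltk, operator, re
--
-- def get_bow(tagged_tokens, stopwords):
-- 	return set([t[0].lower() for t in tagged_tokens if t[0].lower() not in stopwords])
--
-- def baseline2(qbow, sentences, stopwords):
--
--
--     # Collect all the candidate answers
--     answers = []
--     for sent in sentences:
--         # A list of all the word tokens in the sentence
--         sbow = get_bow(sent, stopwords)
--
--         # Count the # of overlapping words between the Q and the A
--         # & is the set intersection operator
--         overlap = len(qbow & sbow)
--
--         if overlap > 0: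
--             answers.append((overlap, sent))
--
--     # Sort the results by the first element of the tuple (i.e., the count)
--     # Sort answers from smallest to largest by default, so reverse it
--     answers = sorted(answers, key=operator.itemgetter(0), reverse=True)
--
--     # Return the best answer
--     if len(answers) > 0:
--         best_answer = (answers[0])[1]
--     # return empty string if no overlap found
--     else:
--         best_answer = []
--
--     # trim qbow words, likely not in answer
--     best_answer = [(w,p) for w,p in best_answer if w not in qbow]
--
--     return best_answer
-- ===== SOURCE B (Python) =====
-- def baseline2(qbow, sentences, stopwords):
--     # For each sentence count directly how many of its distinct lowercased
--     # tokens are question words and not stopwords, and scan the sentences back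
--     # to front keeping the best-so-far with >=, so the first sentence wins
--     # ties; no candidate list and no sort.
--     def overlap(sent):
--         lows = {t[0].lower() for t in sent}
--         return sum(1 for lw in lows if lw in qbow and lw not in stopwords)
--     bo, bs = 0, []
--     for sent in reversed(sentences):
--         cur = overlap(sent)
--         if cur > 0 and cur >= bo:
--             bo, bs = cur, sent
--     return [(w, p) for w, p in bs if w not in qbow]
-- ===== Notes on version B (the rewrite author's own statement) =====
-- stated objective: alternative
-- what changed: Drops the candidate list and the stable reverse sort: overlap is counted from the sentence side (distinct lowercased tokens that are question words and not stopwords, no intersection set built) and a single back-to-front scan with >= keeps the first-occurring best sentence; Pre_ only records that qbow, a Python set, is duplicate-free in its list encoding.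
import Mathlib
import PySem

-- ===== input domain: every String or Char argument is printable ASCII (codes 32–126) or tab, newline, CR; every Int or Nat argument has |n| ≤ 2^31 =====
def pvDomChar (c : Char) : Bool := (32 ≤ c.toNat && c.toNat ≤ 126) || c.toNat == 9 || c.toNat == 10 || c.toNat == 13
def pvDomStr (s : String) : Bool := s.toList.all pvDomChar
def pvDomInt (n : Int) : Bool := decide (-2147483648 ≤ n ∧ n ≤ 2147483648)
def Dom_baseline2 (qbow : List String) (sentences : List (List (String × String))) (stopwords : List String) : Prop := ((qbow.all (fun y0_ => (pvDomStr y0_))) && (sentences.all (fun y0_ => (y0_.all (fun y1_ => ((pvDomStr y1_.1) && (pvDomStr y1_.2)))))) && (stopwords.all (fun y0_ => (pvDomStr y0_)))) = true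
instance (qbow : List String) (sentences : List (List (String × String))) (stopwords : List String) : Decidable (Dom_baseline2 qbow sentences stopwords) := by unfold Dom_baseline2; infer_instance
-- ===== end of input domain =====

-- B drops the candidate list and the stable reverse sort: it counts
-- each sentence's overlap from the sentence side (distinct lowercased tokens that are
-- question words and not stopwords) and scans the sentences
-- back to front keeping the best-so-far (>=, so the first sentence wins ties);
-- objective: alternative (same cost).

-- ===== PORT A =====
-- get_bow(tagged_tokens, stopwords)
def pvGetBow (tagged_tokens : List (String × String)) (stopwords : List String) : PySem.Set String :=
  PySem.Set.ofList
    (((tagged_tokens.filter (fun t => !(stopwords.contains (PySem.Str.lower t.1)))).map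
        (fun t => PySem.Str.lower t.1)))

def baseline2 (qbow : List String) (sentences : List (List (String × String))) (stopwords : List String) : List (String × String) :=
  -- answers = []; for sent in sentences: … append (overlap, sent) when overlap > 0
  let answers : List (Nat × List (String × String)) :=
    sentences.foldl
      (fun acc sent =>
        let sbow := pvGetBow sent stopwords
        let overlap := (PySem.Set.inter qbow sbow).length
        if overlap > 0 then acc ++ [(overlap, sent)] else acc)
      []
  -- answers = sorted(answers, key=itemgetter(0), reverse=True)
  let answers := PySem.List.sorted answers (fun a => a.1) true
  -- best_answer = answers[0][1] if answers else []
  let best_answer : List (String × String) :=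
    match answers with
    | [] => []
    | a :: _ => a.2
  -- trim: [(w,p) for w,p in best_answer if w not in qbow]
  best_answer.filter (fun wp => !(qbow.contains wp.1))

-- ===== PORT B =====
-- overlap(sent): lows = {t[0].lower() for t in sent}; sum(1 for lw in lows if lw in qbow and lw not in stopwords)
-- (a sum of indicators over a set: order-independent, so counting over the Set's list is exact)
def pvOverlapB (qbow stopwords : List String) (sent : List (String × String)) : Nat :=
  let lows := PySem.Set.ofList (sent.map (fun t => PySem.Str.lower t.1))
  lows.countP (fun lw => qbow.contains lw && !(stopwords.contains lw))

def baseline2_alt (qbow : List String) (sentences : List (List (String × String))) (stopwords : List String) : List (String × String) :=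
  -- bo, bs = 0, []; for sent in reversed(sentences): …
  let st : Nat × List (String × String) :=
    sentences.reverse.foldl
      (fun st sent =>
        let cur := pvOverlapB qbow stopwords sent
        if cur > 0 && decide (cur ≥ st.1) then (cur, sent) else st)
      (0, [])
  st.2.filter (fun wp => !(qbow.contains wp.1))

-- ===== PRECONDITION & SPEC =====
-- qbow is a Python set; Pre_ only records the type convention that its list encoding
-- holds distinct elements (a list with duplicates encodes no Python set, so nothing
-- A returns on is excluded).
def Pre_baseline2 (qbow : List String) (sentences : List (List (String × String))) (stopwords : List String) : Prop := qbow.Nodup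
instance (qbow : List String) (sentences : List (List (String × String))) (stopwords : List String) : Decidable (Pre_baseline2 qbow sentences stopwords) := by unfold Pre_baseline2; infer_instance
def pvWitness_baseline2 : List String × (List (List (String × String))) × List String := (["cat"], [[("Cat", "N")]], ["the"])
def Spec_baseline2 (qbow : List String) (sentences : List (List (String × String))) (stopwords : List String) (out : List (String × String)) : Prop := out = baseline2_alt qbow sentences stopwords
instance (qbow : List String) (sentences : List (List (String × String))) (stopwords : List String) (out : List (String × String)) : Decidable (Spec_baseline2 qbow sentences stopwords out) := by unfold Spec_baseline2; infer_instance

-- ===== CLAIM (what is proved, stated in full; the proofs are below) =====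
def Claim_equal_baseline2 : Prop := ∀ (qbow : List String) (sentences : List (List (String × String))) (stopwords : List String), Dom_baseline2 qbow sentences stopwords → Pre_baseline2 qbow sentences stopwords → Spec_baseline2 qbow sentences stopwords (baseline2 qbow sentences stopwords)

-- ===== LEMMAS AND PROOFS =====

-- overlap of one sentence with the question bag of words, A's form
def pvOv (qbow stopwords : List String) (sent : List (String × String)) : Nat :=
  (PySem.Set.inter qbow (pvGetBow sent stopwords)).length

-- A's candidate list
def pvAns (qbow stopwords : List String) (xs : List (List (String × String))) : List (Nat × List (String × String)) :=
  (xs.filter (fun s => pvOv qbow stopwords s > 0)).map (fun s => (pvOv qbow stopwords s, s))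

-- a forward pass with strict >, the stepping stone between A's sort and B's loop
def pvStep (qbow stopwords : List String) (st : Nat × List (String × String)) (sent : List (String × String)) : Nat × List (String × String) :=
  if pvOv qbow stopwords sent > st.1 then (pvOv qbow stopwords sent, sent) else st

-- B's step (backwards pass, with ≥)
def pvStepB (qbow stopwords : List String) (st : Nat × List (String × String)) (sent : List (String × String)) : Nat × List (String × String) :=
  if pvOv qbow stopwords sent > 0 ∧ pvOv qbow stopwords sent ≥ st.1 then (pvOv qbow stopwords sent, sent) else st

-- B's loop as a foldr over the original order
def pvBestB (qbow stopwords : List String) : List (List (String × String)) → Nat × List (String × String)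
  | [] => (0, [])
  | x :: xs => pvStepB qbow stopwords (pvBestB qbow stopwords xs) x

def pvSel (l : List (Nat × List (String × String))) : List (String × String) :=
  match l with
  | [] => []
  | a :: _ => a.2

-- the comparator used by the stable reverse insertion sort on the key .1
def pvCmp (a b : Nat × List (String × String)) : Bool := decide (b.1 < a.1)

-- B's sentence-side distinct count equals A's set-intersection cardinality (qbow duplicate-free)
lemma pvOv_eq_overlapB (qbow stopwords : List String) (sent : List (String × String))
    (hq : qbow.Nodup) :
    pvOverlapB qbow stopwords sent = pvOv qbow stopwords sent := by
  have hget : ∀ w : String, w ∈ pvGetBow sent stopwords ↔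
      (w ∉ stopwords ∧ ∃ t ∈ sent, PySem.Str.lower t.1 = w) := by
    intro w
    simp only [pvGetBow, PySem.Set.mem_ofList, List.mem_map, List.mem_filter]
    constructor
    · rintro ⟨t, ⟨hts, hns⟩, rfl⟩
      exact ⟨by simpa using hns, t, hts, rfl⟩
    · rintro ⟨hns, t, hts, rfl⟩
      exact ⟨t, ⟨hts, by simpa using hns⟩, rfl⟩
  unfold pvOverlapB pvOv
  rw [PySem.Set.inter, List.countP_eq_length_filter]
  apply List.Perm.length_eq
  refine (List.perm_ext_iff_of_nodup ((PySem.Set.nodup_ofList _).filter _) (hq.filter _)).mpr ?_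
  intro w
  simp only [List.mem_filter, PySem.Set.mem_ofList, List.mem_map, Bool.and_eq_true,
    Bool.not_eq_true', List.contains_eq_mem, decide_eq_true_eq, decide_eq_false_iff_not,
    PySem.Set.contains_iff, hget w]
  tauto

lemma pvAns_append (qbow stopwords : List String) (xs : List (List (String × String))) (x : List (String × String)) :
    pvAns qbow stopwords (xs ++ [x]) =
      pvAns qbow stopwords xs ++ (if pvOv qbow stopwords x > 0 then [(pvOv qbow stopwords x, x)] else []) := by
  simp only [pvAns, List.filter_append, List.map_append]
  by_cases h : pvOv qbow stopwords x > 0 <;> simp [h]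

lemma sortedRev_append (l : List (Nat × List (String × String))) (a : Nat × List (String × String)) :
    PySem.List.sorted (l ++ [a]) (fun a => a.1) true =
      PySem.List.insertBy pvCmp a (PySem.List.sorted l (fun a => a.1) true) := by
  rw [PySem.List.sorted_rev_eq_foldl_insertBy, PySem.List.sorted_rev_eq_foldl_insertBy,
    List.foldl_append]
  rfl

-- the joint invariant of the forward strict-> pass: state = (running max, head of the stable reverse sort)
lemma pvMain (qbow stopwords : List String) (xs : List (List (String × String))) :
    (xs.foldl (pvStep qbow stopwords) (0, [])).2
        = pvSel (PySem.List.sorted (pvAns qbow stopwords xs) (fun a => a.1) true)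
    ∧ (match PySem.List.sorted (pvAns qbow stopwords xs) (fun a => a.1) true with
        | [] => (xs.foldl (pvStep qbow stopwords) (0, [])).1 = 0
        | h :: _ => h.1 = (xs.foldl (pvStep qbow stopwords) (0, [])).1) := by
  induction xs using List.reverseRecOn with
  | nil => simp [pvAns, pvSel, PySem.List.sorted]
  | append_singleton xs x ih =>
    obtain ⟨ih1, ih2⟩ := ih
    rw [List.foldl_append, List.foldl_cons, List.foldl_nil, pvAns_append]
    set st := xs.foldl (pvStep qbow stopwords) (0, []) with hst
    by_cases hpos : pvOv qbow stopwords x > 0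
    · simp only [hpos, if_pos]
      rw [sortedRev_append]
      cases hsrt : PySem.List.sorted (pvAns qbow stopwords xs) (fun a => a.1) true with
      | nil =>
        rw [hsrt] at ih1 ih2
        simp only at ih2
        have hmx : st.1 = 0 := ih2
        simp [PySem.List.insertBy, pvStep, hmx, hpos, pvSel]
      | cons h t =>
        rw [hsrt] at ih1 ih2
        simp only at ih2
        by_cases hgt : pvOv qbow stopwords x > st.1
        · have hc : pvCmp (pvOv qbow stopwords x, x) h = true := by
            simp [pvCmp, ih2]; omega
          simp [PySem.List.insertBy, hc, pvStep, hgt, pvSel]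
        · have hc : pvCmp (pvOv qbow stopwords x, x) h = false := by
            simp [pvCmp, ih2]; omega
          simp [PySem.List.insertBy, hc, pvStep, hgt, pvSel, ih1, ih2]
    · simp only [hpos, List.append_nil, if_false]
      have hz : pvOv qbow stopwords x = 0 := by omega
      have hstep : pvStep qbow stopwords st x = st := by
        simp [pvStep, hz]
      rw [hstep]
      exact ⟨ih1, ih2⟩

-- B's backwards pass returns (0, []) if its max is 0
lemma pvBestB_zero (qbow stopwords : List String) (xs : List (List (String × String)))
    (h : (pvBestB qbow stopwords xs).1 = 0) : pvBestB qbow stopwords xs = (0, []) := by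
  induction xs with
  | nil => rfl
  | cons x xs ih =>
    simp only [pvBestB, pvStepB] at h ⊢
    split at h
    next hc => simp only at h; omega
    next hc =>
      rw [ih h] at hc ⊢
      rw [if_neg hc]

-- the forward strict-> pass from any state equals combining the state with B's backwards pass
lemma pvFold_eq_combine (qbow stopwords : List String) (xs : List (List (String × String))) :
    ∀ st : Nat × List (String × String),
      xs.foldl (pvStep qbow stopwords) st =
        (if (pvBestB qbow stopwords xs).1 > st.1 then pvBestB qbow stopwords xs else st) := by
  induction xs with
  | nil => intro st; simp [pvBestB]
  | cons x xs ih =>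
    intro st
    rw [List.foldl_cons, ih]
    simp only [pvBestB, pvStepB, pvStep]
    rcases pvBestB qbow stopwords xs with ⟨bo, bs⟩
    by_cases hc : pvOv qbow stopwords x > st.1 <;>
      by_cases hb : pvOv qbow stopwords x > 0 ∧ pvOv qbow stopwords x ≥ bo <;>
        simp only [hc, hb, if_pos, if_false] <;>
          split_ifs <;> simp_all <;> omega

-- B's reversed loop is the foldr pvBestB
lemma pvLoopB_eq (qbow stopwords : List String) (xs : List (List (String × String)))
    (hq : qbow.Nodup) :
    xs.reverse.foldl
      (fun st sent =>
        let cur := pvOverlapB qbow stopwords sent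
        if cur > 0 && decide (cur ≥ st.1) then (cur, sent) else st)
      ((0, []) : Nat × List (String × String)) = pvBestB qbow stopwords xs := by
  rw [List.foldl_reverse]
  induction xs with
  | nil => rfl
  | cons x xs ih =>
    rw [List.foldr_cons, ih]
    simp only [pvOv_eq_overlapB qbow stopwords _ hq, pvBestB, pvStepB]
    by_cases hcond : pvOv qbow stopwords x > 0 ∧
        pvOv qbow stopwords x ≥ (pvBestB qbow stopwords xs).1
    · rw [if_pos hcond, if_pos (by simp [hcond.1, hcond.2])]
    · rw [if_neg hcond, if_neg (by simpa using hcond)]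

lemma baseline2_eq_alt (qbow : List String) (sentences : List (List (String × String))) (stopwords : List String) (hq : qbow.Nodup) :
    baseline2 qbow sentences stopwords = baseline2_alt qbow sentences stopwords := by
  have hans : sentences.foldl
      (fun acc sent =>
        let sbow := pvGetBow sent stopwords
        let overlap := (PySem.Set.inter qbow sbow).length
        if overlap > 0 then acc ++ [(overlap, sent)] else acc)
      ([] : List (Nat × List (String × String))) = pvAns qbow stopwords sentences := by
    simpa [pvOv] using PySem.List.foldl_append_if
      (fun s => decide (pvOv qbow stopwords s > 0)) (fun s => (pvOv qbow stopwords s, s)) sentences []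
  -- the selected sentence of A's sort equals B's loop result
  have hsel : pvSel (PySem.List.sorted (pvAns qbow stopwords sentences) (fun a => a.1) true)
      = (pvBestB qbow stopwords sentences).2 := by
    rw [← (pvMain qbow stopwords sentences).1, pvFold_eq_combine]
    by_cases hz : (pvBestB qbow stopwords sentences).1 > 0
    · simp [hz]
    · rw [if_neg (by simpa using hz), pvBestB_zero qbow stopwords sentences (by omega)]
  simp only [baseline2, baseline2_alt]
  rw [hans, pvLoopB_eq qbow stopwords sentences hq]
  have : (match PySem.List.sorted (pvAns qbow stopwords sentences) (fun a => a.1) true with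
      | [] => ([] : List (String × String))
      | a :: _ => a.2) = pvSel (PySem.List.sorted (pvAns qbow stopwords sentences) (fun a => a.1) true) := rfl
  rw [this, hsel]

-- ===== VERDICT (by name: the statement is the Claim_ definition above) =====
theorem baseline2_spec : Claim_equal_baseline2 := by
  intro qbow sentences stopwords _ hpre
  unfold Spec_baseline2
  exact baseline2_eq_alt qbow sentences stopwords hpre
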